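-- pv_equiv track=rewrite | github.com/h-spear/problem-solving-python | programmers/level2/check_keep_distance.py | check_keep_dist
-- ===== SOURCE A (Python) =====
-- dx = [1, -1, 0, 0, 1, 1, -1, -1, 2, -2, 0, 0]
--
-- dy = [0, 0, 1, -1, 1, -1, 1, -1, 0, 0, 2, -2]
--
-- def check_person(place, x, y):
--     for i in range(12):
--         nx = x + dx[i]
--         ny = y + dy[i]
--
--         if nx < 0 or ny < 0 or nx >= 5 or ny >= 5:
--             continue
--         if place[nx][ny] != "P":
--             continue
--         if i < 4 and (nx == x or ny == y):
--             return False
--         if i < 8 and (place[nx][y] != "X" or place[x][ny] != "X"):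
--             return False
--         if i >= 8 and place[(nx + x) // 2][(ny + y) // 2] != "X":
--             return False
--     return True
--
-- def check_keep_dist(place):
--     for x in range(5):
--         for y in range(5):
--             if place[x][y] != "P":
--                 continue
--             if check_person(place, x, y):
--                 continue
--             return 0
--     return 1
-- ===== SOURCE B (Python) =====
-- def check_keep_dist(place):
--     seen = []
--     for y in range(5):
--         for x in range(5):
--             if place[x][y] != "P":
--                 continue
--             for u, v in seen:
--                 d = abs(x - u) + abs(y - v)
--                 if d > 2:
--                     continue
--                 if d == 1:
--                     return 0
--                 if x != u and y != v:
--                     if place[x][v] != "X" or place[u][y] != "X":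
--                         return 0
--                 elif place[(x + u) // 2][(y + v) // 2] != "X":
--                     return 0
--             seen.append((x, y))
--     return 1
-- ===== Notes on version B (the rewrite author's own statement) =====
-- stated objective: alternative
-- what changed: B makes one column-major pass over the board, comparing each person only with the people already seen (each unordered pair checked once, classified by Manhattan-distance arithmetic), instead of A's scan of every cell against a 12-entry offset table that examines each pair twice.
-- outside the precondition, e.g. on check_keep_dist(['ab, ab, ab, c', 'XXPXPX', 'XXPPXPP', '', '', '']): A returns 0, B raises IndexError
import Mathlib
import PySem

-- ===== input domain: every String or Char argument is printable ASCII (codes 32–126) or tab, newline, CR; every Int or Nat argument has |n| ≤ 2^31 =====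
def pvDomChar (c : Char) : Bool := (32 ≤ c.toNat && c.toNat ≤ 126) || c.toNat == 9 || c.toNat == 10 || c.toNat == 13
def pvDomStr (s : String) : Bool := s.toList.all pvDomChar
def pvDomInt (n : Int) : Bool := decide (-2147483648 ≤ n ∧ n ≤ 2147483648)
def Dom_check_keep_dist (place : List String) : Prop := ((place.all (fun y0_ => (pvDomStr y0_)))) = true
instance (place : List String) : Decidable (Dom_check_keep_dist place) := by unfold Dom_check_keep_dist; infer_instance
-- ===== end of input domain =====

-- B makes one column-major pass comparing each person only with the people already seen (each
-- unordered pair once, classified by Manhattan distance), instead of A's per-cell scan over a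
-- 12-entry offset table (objective: alternative decomposition).


-- place[i][j] (both programs index the same way; in range under Pre_, so the defaults are never used)
-- place[i][j]: B reads the board only through this total lookup (missing cells read as open 'O');
-- on every input admitted by Pre_ A's execution never reaches a missing cell, so it is exact for A there.
def pvCell (place : List String) (i j : Int) : Char :=
  PySem.List.pyGetD (PySem.List.pyGetD place i "").toList j 'O'

-- ===== PORT A =====
def pvDx : List Int := [1, -1, 0, 0, 1, 1, -1, -1, 2, -2, 0, 0]
def pvDy : List Int := [0, 0, 1, -1, 1, -1, 1, -1, 0, 0, 2, -2]

-- the body of check_person's loop: true = "return False" at step i, false = "continue"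
def pvCondA (place : List String) (x y i : Int) : Bool :=
  let nx := x + PySem.List.pyGetD pvDx i 0
  let ny := y + PySem.List.pyGetD pvDy i 0
  if nx < 0 ∨ ny < 0 ∨ 5 ≤ nx ∨ 5 ≤ ny then false
  else if pvCell place nx ny ≠ 'P' then false
  else if i < 4 ∧ (nx = x ∨ ny = y) then true
  else if i < 8 ∧ (pvCell place nx y ≠ 'X' ∨ pvCell place x ny ≠ 'X') then true
  else if 8 ≤ i ∧ pvCell place (PySem.Int.floordiv (nx + x) 2) (PySem.Int.floordiv (ny + y) 2) ≠ 'X' then true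
  else false

def check_person (place : List String) (x y : Int) : Bool :=
  !((PySem.List.pyRange 0 12 1).any (pvCondA place x y))

def check_keep_dist (place : List String) : Int :=
  if (PySem.List.pyRange 0 5 1).any (fun x =>
       (PySem.List.pyRange 0 5 1).any (fun y =>
         pvCell place x y == 'P' && !(check_person place x y)))
  then 0 else 1

-- ===== PORT B =====
-- the scan order of B's two for-loops: column by column, top to bottom
def pvColOrder : List (Int × Int) :=
  (PySem.List.pyRange 0 5 1).flatMap (fun y => (PySem.List.pyRange 0 5 1).map (fun x => (x, y)))

-- does the current person (x,y) conflict with the already-seen person (u,v)? (body of B's inner for loop)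
def pvViol (place : List String) (x y u v : Int) : Bool :=
  let d := |x - u| + |y - v|
  if 2 < d then false
  else if d = 1 then true
  else if x ≠ u ∧ y ≠ v then
    decide (pvCell place x v ≠ 'X' ∨ pvCell place u y ≠ 'X')
  else
    decide (pvCell place (PySem.Int.floordiv (x + u) 2) (PySem.Int.floordiv (y + v) 2) ≠ 'X')

-- B's nested loops with the `seen` accumulator and early return
def pvScan (place : List String) : List (Int × Int) → List (Int × Int) → Bool
  | [], _seen => false
  | (x, y) :: rest, seen =>
      if pvCell place x y ≠ 'P' then pvScan place rest seen
      else if seen.any (fun q => pvViol place x y q.1 q.2) then true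
      else pvScan place rest (seen ++ [(x, y)])

def check_keep_dist_alt (place : List String) : Int :=
  if pvScan place pvColOrder [] then 0 else 1

-- ===== PRECONDITION & SPEC =====
-- Pre_ admits every full 5x5 board, and additionally the ragged boards on which both programs
-- provably return before touching any missing cell: the first 'P' of A's row-major scan (all rows
-- before it complete and P-free) has a 'P' directly below it or directly to its right, with just
-- enough row length for the scan of either program to reach that pair. It excludes the remaining
-- ragged boards, where A raises IndexError or returns 0 depending on where its scan stops, and B
-- likewise.
def Pre_check_keep_dist (place : List String) : Prop :=
  (5 ≤ place.length ∧ ∀ s ∈ place.take 5, 5 ≤ s.toList.length) ∨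
  (∃ x ∈ List.range 5, ∃ y ∈ List.range 5,
    x < place.length ∧
    (∀ r ∈ List.range x, 5 ≤ (place.getD r "").toList.length ∧
      ∀ j ∈ List.range 5, (place.getD r "").toList.getD j 'O' ≠ 'P') ∧
    y < (place.getD x "").toList.length ∧
    (∀ j ∈ List.range y, (place.getD x "").toList.getD j 'O' ≠ 'P') ∧
    (place.getD x "").toList.getD y 'O' = 'P' ∧
    (4 ≤ x ∨ (x + 1 < place.length ∧ y < (place.getD (x + 1) "").toList.length)) ∧
    ((x + 1 < 5 ∧ x + 1 < place.length ∧ (place.getD (x + 1) "").toList.getD y 'O' = 'P' ∧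
        ((y = 0 ∧ ∀ r ∈ List.range (x + 2), 1 ≤ (place.getD r "").toList.length) ∨
         (5 ≤ place.length ∧ ∀ r ∈ List.range 5, y + 1 ≤ (place.getD r "").toList.length))) ∨
     (¬(x + 1 < 5 ∧ x + 1 < place.length ∧ (place.getD (x + 1) "").toList.getD y 'O' = 'P') ∧
        y + 1 < 5 ∧ y + 1 < (place.getD x "").toList.length ∧
        (place.getD x "").toList.getD (y + 1) 'O' = 'P' ∧
        5 ≤ place.length ∧ (∀ r ∈ List.range 5, y + 1 ≤ (place.getD r "").toList.length) ∧
        (∀ r ∈ List.range (x + 1), y + 2 ≤ (place.getD r "").toList.length))))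

instance (place : List String) : Decidable (Pre_check_keep_dist place) := by
  unfold Pre_check_keep_dist; infer_instance

def pvWitness_check_keep_dist : List String := ["XXXXX", "XPXPX", "XXXXX", "XXXXX", "XXXXX"]

def Spec_check_keep_dist (place : List String) (out : Int) : Prop := out = check_keep_dist_alt place
instance (place : List String) (out : Int) : Decidable (Spec_check_keep_dist place out) := by
  unfold Spec_check_keep_dist; infer_instance

-- ===== CLAIM (what is proved, stated in full; the proofs are below) =====
def Claim_equal_check_keep_dist : Prop := ∀ (place : List String), Dom_check_keep_dist place → Pre_check_keep_dist place → Spec_check_keep_dist place (check_keep_dist place)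

-- ===== LEMMAS AND PROOFS =====

-- a "person": a P cell of the 5x5 board
def pvGood (place : List String) (x y : Int) : Prop :=
  0 ≤ x ∧ x < 5 ∧ 0 ≤ y ∧ y < 5 ∧ pvCell place x y = 'P'

theorem pv_viol_symm (place : List String) (x y u v : Int) :
    pvViol place x y u v = pvViol place u v x y := by
  simp only [pvViol, abs_sub_comm u x, abs_sub_comm v y, add_comm u x, add_comm v y]
  by_cases h1 : 2 < |x - u| + |y - v| <;> by_cases h2 : |x - u| + |y - v| = 1 <;>
    by_cases h3 : x ≠ u ∧ y ≠ v <;>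
      simp [h1, h2, h3, or_comm, ne_comm]


theorem pv_condA_0 (place : List String) (x y : Int) :
    pvCondA place x y 0 = true ↔ (0 ≤ (x + 1) ∧ 0 ≤ y ∧ (x + 1) < 5 ∧ y < 5 ∧ pvCell place (x + 1) y = 'P') := by
  simp only [pvCondA,
    show PySem.List.pyGetD pvDx 0 0 = 1 from by decide,
    show PySem.List.pyGetD pvDy 0 0 = 0 from by decide, add_zero]
  split_ifs with h1 h2 h3 h4 h5 <;> simp_all <;> omega

theorem pv_condA_1 (place : List String) (x y : Int) :
    pvCondA place x y 1 = true ↔ (0 ≤ (x + -1) ∧ 0 ≤ y ∧ (x + -1) < 5 ∧ y < 5 ∧ pvCell place (x + -1) y = 'P') := by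
  simp only [pvCondA,
    show PySem.List.pyGetD pvDx 1 0 = -1 from by decide,
    show PySem.List.pyGetD pvDy 1 0 = 0 from by decide, add_zero]
  split_ifs with h1 h2 h3 h4 h5 <;> simp_all <;> omega

theorem pv_condA_2 (place : List String) (x y : Int) :
    pvCondA place x y 2 = true ↔ (0 ≤ x ∧ 0 ≤ (y + 1) ∧ x < 5 ∧ (y + 1) < 5 ∧ pvCell place x (y + 1) = 'P') := by
  simp only [pvCondA,
    show PySem.List.pyGetD pvDx 2 0 = 0 from by decide,
    show PySem.List.pyGetD pvDy 2 0 = 1 from by decide, add_zero]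
  split_ifs with h1 h2 h3 h4 h5 <;> simp_all <;> omega

theorem pv_condA_3 (place : List String) (x y : Int) :
    pvCondA place x y 3 = true ↔ (0 ≤ x ∧ 0 ≤ (y + -1) ∧ x < 5 ∧ (y + -1) < 5 ∧ pvCell place x (y + -1) = 'P') := by
  simp only [pvCondA,
    show PySem.List.pyGetD pvDx 3 0 = 0 from by decide,
    show PySem.List.pyGetD pvDy 3 0 = -1 from by decide, add_zero]
  split_ifs with h1 h2 h3 h4 h5 <;> simp_all <;> omega

theorem pv_condA_4 (place : List String) (x y : Int) :
    pvCondA place x y 4 = true ↔ (0 ≤ (x + 1) ∧ 0 ≤ (y + 1) ∧ (x + 1) < 5 ∧ (y + 1) < 5 ∧ pvCell place (x + 1) (y + 1) = 'P' ∧ (pvCell place (x + 1) y ≠ 'X' ∨ pvCell place x (y + 1) ≠ 'X')) := by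
  simp only [pvCondA,
    show PySem.List.pyGetD pvDx 4 0 = 1 from by decide,
    show PySem.List.pyGetD pvDy 4 0 = 1 from by decide, add_zero]
  split_ifs with h1 h2 h3 h4 h5 <;> simp_all <;> omega

theorem pv_condA_5 (place : List String) (x y : Int) :
    pvCondA place x y 5 = true ↔ (0 ≤ (x + 1) ∧ 0 ≤ (y + -1) ∧ (x + 1) < 5 ∧ (y + -1) < 5 ∧ pvCell place (x + 1) (y + -1) = 'P' ∧ (pvCell place (x + 1) y ≠ 'X' ∨ pvCell place x (y + -1) ≠ 'X')) := by
  simp only [pvCondA,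
    show PySem.List.pyGetD pvDx 5 0 = 1 from by decide,
    show PySem.List.pyGetD pvDy 5 0 = -1 from by decide, add_zero]
  split_ifs with h1 h2 h3 h4 h5 <;> simp_all <;> omega

theorem pv_condA_6 (place : List String) (x y : Int) :
    pvCondA place x y 6 = true ↔ (0 ≤ (x + -1) ∧ 0 ≤ (y + 1) ∧ (x + -1) < 5 ∧ (y + 1) < 5 ∧ pvCell place (x + -1) (y + 1) = 'P' ∧ (pvCell place (x + -1) y ≠ 'X' ∨ pvCell place x (y + 1) ≠ 'X')) := by
  simp only [pvCondA,
    show PySem.List.pyGetD pvDx 6 0 = -1 from by decide,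
    show PySem.List.pyGetD pvDy 6 0 = 1 from by decide, add_zero]
  split_ifs with h1 h2 h3 h4 h5 <;> simp_all <;> omega

theorem pv_condA_7 (place : List String) (x y : Int) :
    pvCondA place x y 7 = true ↔ (0 ≤ (x + -1) ∧ 0 ≤ (y + -1) ∧ (x + -1) < 5 ∧ (y + -1) < 5 ∧ pvCell place (x + -1) (y + -1) = 'P' ∧ (pvCell place (x + -1) y ≠ 'X' ∨ pvCell place x (y + -1) ≠ 'X')) := by
  simp only [pvCondA,
    show PySem.List.pyGetD pvDx 7 0 = -1 from by decide,
    show PySem.List.pyGetD pvDy 7 0 = -1 from by decide, add_zero]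
  split_ifs with h1 h2 h3 h4 h5 <;> simp_all <;> omega

theorem pv_condA_8 (place : List String) (x y : Int) :
    pvCondA place x y 8 = true ↔ (0 ≤ (x + 2) ∧ 0 ≤ y ∧ (x + 2) < 5 ∧ y < 5 ∧ pvCell place (x + 2) y = 'P' ∧ pvCell place (PySem.Int.floordiv ((x + 2) + x) 2) (PySem.Int.floordiv (y + y) 2) ≠ 'X') := by
  simp only [pvCondA,
    show PySem.List.pyGetD pvDx 8 0 = 2 from by decide,
    show PySem.List.pyGetD pvDy 8 0 = 0 from by decide, add_zero]
  split_ifs with h1 h2 h3 h4 h5 <;> simp_all <;> omega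

theorem pv_condA_9 (place : List String) (x y : Int) :
    pvCondA place x y 9 = true ↔ (0 ≤ (x + -2) ∧ 0 ≤ y ∧ (x + -2) < 5 ∧ y < 5 ∧ pvCell place (x + -2) y = 'P' ∧ pvCell place (PySem.Int.floordiv ((x + -2) + x) 2) (PySem.Int.floordiv (y + y) 2) ≠ 'X') := by
  simp only [pvCondA,
    show PySem.List.pyGetD pvDx 9 0 = -2 from by decide,
    show PySem.List.pyGetD pvDy 9 0 = 0 from by decide, add_zero]
  split_ifs with h1 h2 h3 h4 h5 <;> simp_all <;> omega

theorem pv_condA_10 (place : List String) (x y : Int) :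
    pvCondA place x y 10 = true ↔ (0 ≤ x ∧ 0 ≤ (y + 2) ∧ x < 5 ∧ (y + 2) < 5 ∧ pvCell place x (y + 2) = 'P' ∧ pvCell place (PySem.Int.floordiv (x + x) 2) (PySem.Int.floordiv ((y + 2) + y) 2) ≠ 'X') := by
  simp only [pvCondA,
    show PySem.List.pyGetD pvDx 10 0 = 0 from by decide,
    show PySem.List.pyGetD pvDy 10 0 = 2 from by decide, add_zero]
  split_ifs with h1 h2 h3 h4 h5 <;> simp_all <;> omega

theorem pv_condA_11 (place : List String) (x y : Int) :
    pvCondA place x y 11 = true ↔ (0 ≤ x ∧ 0 ≤ (y + -2) ∧ x < 5 ∧ (y + -2) < 5 ∧ pvCell place x (y + -2) = 'P' ∧ pvCell place (PySem.Int.floordiv (x + x) 2) (PySem.Int.floordiv ((y + -2) + y) 2) ≠ 'X') := by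
  simp only [pvCondA,
    show PySem.List.pyGetD pvDx 11 0 = 0 from by decide,
    show PySem.List.pyGetD pvDy 11 0 = -2 from by decide, add_zero]
  split_ifs with h1 h2 h3 h4 h5 <;> simp_all <;> omega
theorem pv_viol_d1 (place : List String) (x y u v : Int) (hd : |x - u| + |y - v| = 1) :
    pvViol place x y u v = true := by
  simp [pvViol, hd]

theorem pv_viol_diag (place : List String) (x y u v : Int)
    (h1 : |x - u| = 1) (h2 : |y - v| = 1)
    (hc : pvCell place x v ≠ 'X' ∨ pvCell place u y ≠ 'X') :
    pvViol place x y u v = true := by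
  have hxu : x ≠ u := by rcases abs_cases (x - u) with ⟨e, _⟩ | ⟨e, _⟩ <;> omega
  have hyv : y ≠ v := by rcases abs_cases (y - v) with ⟨e, _⟩ | ⟨e, _⟩ <;> omega
  simp [pvViol, h1, h2, hxu, hyv, hc]

theorem pv_viol_straight (place : List String) (x y u v : Int)
    (hd : |x - u| + |y - v| = 2) (heq : x = u ∨ y = v)
    (hc : pvCell place (PySem.Int.floordiv (x + u) 2) (PySem.Int.floordiv (y + v) 2) ≠ 'X') :
    pvViol place x y u v = true := by
  have hne : ¬(x ≠ u ∧ y ≠ v) := by tauto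
  simp [pvViol, hd, hne]
  simpa using hc


theorem pv_fwd (place : List String) (x y : Int)
    (i : Int) (hi : i ∈ PySem.List.pyRange 0 12 1) (hc : pvCondA place x y i = true) :
    ∃ u v, pvGood place u v ∧ (x, y) ≠ (u, v) ∧ pvViol place x y u v = true := by
  rw [PySem.List.mem_pyRange_one] at hi
  obtain ⟨h0, h12⟩ := hi
  interval_cases i
  · -- i = 0 : (1,0)
    obtain ⟨hb1, hb2, hb3, hb4, hP⟩ := (pv_condA_0 place x y).mp hc
    refine ⟨x + 1, y, ⟨hb1, hb3, hb2, hb4, hP⟩, by simp only [ne_eq, Prod.mk.injEq, not_and]; omega, ?_⟩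
    exact pv_viol_d1 _ _ _ _ _ (by rw [show x - (x + 1) = -1 from by ring, sub_self]; norm_num)
  · -- i = 1 : (-1,0)
    obtain ⟨hb1, hb2, hb3, hb4, hP⟩ := (pv_condA_1 place x y).mp hc
    refine ⟨x + -1, y, ⟨hb1, hb3, hb2, hb4, hP⟩, by simp only [ne_eq, Prod.mk.injEq, not_and]; omega, ?_⟩
    exact pv_viol_d1 _ _ _ _ _ (by rw [show x - (x + -1) = 1 from by ring, sub_self]; norm_num)
  · -- i = 2 : (0,1)
    obtain ⟨hb1, hb2, hb3, hb4, hP⟩ := (pv_condA_2 place x y).mp hc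
    refine ⟨x, y + 1, ⟨hb1, hb3, hb2, hb4, hP⟩, by simp only [ne_eq, Prod.mk.injEq, not_and]; omega, ?_⟩
    exact pv_viol_d1 _ _ _ _ _ (by rw [show y - (y + 1) = -1 from by ring, sub_self]; norm_num)
  · -- i = 3 : (0,-1)
    obtain ⟨hb1, hb2, hb3, hb4, hP⟩ := (pv_condA_3 place x y).mp hc
    refine ⟨x, y + -1, ⟨hb1, hb3, hb2, hb4, hP⟩, by simp only [ne_eq, Prod.mk.injEq, not_and]; omega, ?_⟩
    exact pv_viol_d1 _ _ _ _ _ (by rw [show y - (y + -1) = 1 from by ring, sub_self]; norm_num)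
  · -- i = 4 : (1,1)
    obtain ⟨hb1, hb2, hb3, hb4, hP, hX⟩ := (pv_condA_4 place x y).mp hc
    refine ⟨x + 1, y + 1, ⟨hb1, hb3, hb2, hb4, hP⟩, by simp only [ne_eq, Prod.mk.injEq, not_and]; omega, ?_⟩
    exact pv_viol_diag _ _ _ _ _ (by rw [show x - (x + 1) = -1 from by ring]; norm_num)
      (by rw [show y - (y + 1) = -1 from by ring]; norm_num) (by tauto)
  · -- i = 5 : (1,-1)
    obtain ⟨hb1, hb2, hb3, hb4, hP, hX⟩ := (pv_condA_5 place x y).mp hc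
    refine ⟨x + 1, y + -1, ⟨hb1, hb3, hb2, hb4, hP⟩, by simp only [ne_eq, Prod.mk.injEq, not_and]; omega, ?_⟩
    exact pv_viol_diag _ _ _ _ _ (by rw [show x - (x + 1) = -1 from by ring]; norm_num)
      (by rw [show y - (y + -1) = 1 from by ring]; norm_num) (by tauto)
  · -- i = 6 : (-1,1)
    obtain ⟨hb1, hb2, hb3, hb4, hP, hX⟩ := (pv_condA_6 place x y).mp hc
    refine ⟨x + -1, y + 1, ⟨hb1, hb3, hb2, hb4, hP⟩, by simp only [ne_eq, Prod.mk.injEq, not_and]; omega, ?_⟩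
    exact pv_viol_diag _ _ _ _ _ (by rw [show x - (x + -1) = 1 from by ring]; norm_num)
      (by rw [show y - (y + 1) = -1 from by ring]; norm_num) (by tauto)
  · -- i = 7 : (-1,-1)
    obtain ⟨hb1, hb2, hb3, hb4, hP, hX⟩ := (pv_condA_7 place x y).mp hc
    refine ⟨x + -1, y + -1, ⟨hb1, hb3, hb2, hb4, hP⟩, by simp only [ne_eq, Prod.mk.injEq, not_and]; omega, ?_⟩
    exact pv_viol_diag _ _ _ _ _ (by rw [show x - (x + -1) = 1 from by ring]; norm_num)
      (by rw [show y - (y + -1) = 1 from by ring]; norm_num) (by tauto)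
  · -- i = 8 : (2,0)
    obtain ⟨hb1, hb2, hb3, hb4, hP, hX⟩ := (pv_condA_8 place x y).mp hc
    refine ⟨x + 2, y, ⟨hb1, hb3, hb2, hb4, hP⟩, by simp only [ne_eq, Prod.mk.injEq, not_and]; omega, ?_⟩
    refine pv_viol_straight _ _ _ _ _ (by rw [show x - (x + 2) = -2 from by ring, sub_self]; norm_num) (Or.inr rfl) ?_
    rw [show x + (x + 2) = x + 2 + x from by ring]
    exact hX
  · -- i = 9 : (-2,0)
    obtain ⟨hb1, hb2, hb3, hb4, hP, hX⟩ := (pv_condA_9 place x y).mp hc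
    refine ⟨x + -2, y, ⟨hb1, hb3, hb2, hb4, hP⟩, by simp only [ne_eq, Prod.mk.injEq, not_and]; omega, ?_⟩
    refine pv_viol_straight _ _ _ _ _ (by rw [show x - (x + -2) = 2 from by ring, sub_self]; norm_num) (Or.inr rfl) ?_
    rw [show x + (x + -2) = x + -2 + x from by ring]
    exact hX
  · -- i = 10 : (0,2)
    obtain ⟨hb1, hb2, hb3, hb4, hP, hX⟩ := (pv_condA_10 place x y).mp hc
    refine ⟨x, y + 2, ⟨hb1, hb3, hb2, hb4, hP⟩, by simp only [ne_eq, Prod.mk.injEq, not_and]; omega, ?_⟩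
    refine pv_viol_straight _ _ _ _ _ (by rw [show y - (y + 2) = -2 from by ring, sub_self]; norm_num) (Or.inl rfl) ?_
    rw [show y + (y + 2) = y + 2 + y from by ring]
    exact hX
  · -- i = 11 : (0,-2)
    obtain ⟨hb1, hb2, hb3, hb4, hP, hX⟩ := (pv_condA_11 place x y).mp hc
    refine ⟨x, y + -2, ⟨hb1, hb3, hb2, hb4, hP⟩, by simp only [ne_eq, Prod.mk.injEq, not_and]; omega, ?_⟩
    refine pv_viol_straight _ _ _ _ _ (by rw [show y - (y + -2) = 2 from by ring, sub_self]; norm_num) (Or.inl rfl) ?_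
    rw [show y + (y + -2) = y + -2 + y from by ring]
    exact hX

theorem pv_bwd (place : List String) (x y u v : Int) (hgu : pvGood place u v)
    (hne : (x, y) ≠ (u, v)) (hv : pvViol place x y u v = true) :
    ∃ i ∈ PySem.List.pyRange 0 12 1, pvCondA place x y i = true := by
  obtain ⟨hu0, hu5, hw0, hw5, hP⟩ := hgu
  have hne' : ¬(x = u ∧ y = v) := by
    rintro ⟨rfl, rfl⟩; exact hne rfl
  simp only [pvViol] at hv
  split_ifs at hv with h1 h2 h3
  · -- distance 1
    have h4 : (u = x + 1 ∧ v = y) ∨ (u = x + -1 ∧ v = y) ∨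
        (u = x ∧ v = y + 1) ∨ (u = x ∧ v = y + -1) := by
      rcases abs_cases (x - u) with ⟨e1, _⟩ | ⟨e1, _⟩ <;>
        rcases abs_cases (y - v) with ⟨e2, _⟩ | ⟨e2, _⟩ <;> omega
    rcases h4 with ⟨h5, h6⟩ | ⟨h5, h6⟩ | ⟨h5, h6⟩ | ⟨h5, h6⟩
    · exact ⟨0, by decide, (pv_condA_0 place x y).mpr
        ⟨by omega, by omega, by omega, by omega, by rw [← h5, ← h6]; exact hP⟩⟩
    · exact ⟨1, by decide, (pv_condA_1 place x y).mpr
        ⟨by omega, by omega, by omega, by omega, by rw [← h5, ← h6]; exact hP⟩⟩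
    · exact ⟨2, by decide, (pv_condA_2 place x y).mpr
        ⟨by omega, by omega, by omega, by omega, by rw [← h6, ← h5]; exact hP⟩⟩
    · exact ⟨3, by decide, (pv_condA_3 place x y).mpr
        ⟨by omega, by omega, by omega, by omega, by rw [← h6, ← h5]; exact hP⟩⟩
  · -- diagonal
    rw [decide_eq_true_eq] at hv
    obtain ⟨hxu, hyv⟩ := h3
    have h4 : (u = x + 1 ∧ v = y + 1) ∨ (u = x + 1 ∧ v = y + -1) ∨
        (u = x + -1 ∧ v = y + 1) ∨ (u = x + -1 ∧ v = y + -1) := by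
      rcases abs_cases (x - u) with ⟨e1, _⟩ | ⟨e1, _⟩ <;>
        rcases abs_cases (y - v) with ⟨e2, _⟩ | ⟨e2, _⟩ <;> omega
    rcases h4 with ⟨h5, h6⟩ | ⟨h5, h6⟩ | ⟨h5, h6⟩ | ⟨h5, h6⟩
    · exact ⟨4, by decide, (pv_condA_4 place x y).mpr
        ⟨by omega, by omega, by omega, by omega, by rw [← h5, ← h6]; exact hP,
         by rw [← h5, ← h6]; exact hv.symm⟩⟩
    · exact ⟨5, by decide, (pv_condA_5 place x y).mpr
        ⟨by omega, by omega, by omega, by omega, by rw [← h5, ← h6]; exact hP,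
         by rw [← h5, ← h6]; exact hv.symm⟩⟩
    · exact ⟨6, by decide, (pv_condA_6 place x y).mpr
        ⟨by omega, by omega, by omega, by omega, by rw [← h5, ← h6]; exact hP,
         by rw [← h5, ← h6]; exact hv.symm⟩⟩
    · exact ⟨7, by decide, (pv_condA_7 place x y).mpr
        ⟨by omega, by omega, by omega, by omega, by rw [← h5, ← h6]; exact hP,
         by rw [← h5, ← h6]; exact hv.symm⟩⟩
  · -- straight, distance 2
    rw [decide_eq_true_eq] at hv
    have h3' : x = u ∨ y = v := by tauto
    rcases h3' with hxu | hyv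
    · have h4 : v = y + 2 ∨ v = y + -2 := by
        have hz : |x - u| = 0 := by rw [hxu, sub_self, abs_zero]
        rcases abs_cases (y - v) with ⟨e2, _⟩ | ⟨e2, _⟩ <;> omega
      rw [← hxu] at hv
      rcases h4 with h5 | h5 <;> rw [h5] at hv
      · refine ⟨10, by decide, (pv_condA_10 place x y).mpr
          ⟨by omega, by omega, by omega, by omega, ?_, ?_⟩⟩
        · rw [hxu, ← h5]; exact hP
        · rw [show y + 2 + y = y + (y + 2) from by ring]; exact hv
      · refine ⟨11, by decide, (pv_condA_11 place x y).mpr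
          ⟨by omega, by omega, by omega, by omega, ?_, ?_⟩⟩
        · rw [hxu, ← h5]; exact hP
        · rw [show y + -2 + y = y + (y + -2) from by ring]; exact hv
    · have h4 : u = x + 2 ∨ u = x + -2 := by
        have hz : |y - v| = 0 := by rw [hyv, sub_self, abs_zero]
        rcases abs_cases (x - u) with ⟨e1, _⟩ | ⟨e1, _⟩ <;> omega
      rw [← hyv] at hv
      rcases h4 with h5 | h5 <;> rw [h5] at hv
      · refine ⟨8, by decide, (pv_condA_8 place x y).mpr
          ⟨by omega, by omega, by omega, by omega, ?_, ?_⟩⟩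
        · rw [hyv, ← h5]; exact hP
        · rw [show x + 2 + x = x + (x + 2) from by ring]; exact hv
      · refine ⟨9, by decide, (pv_condA_9 place x y).mpr
          ⟨by omega, by omega, by omega, by omega, ?_, ?_⟩⟩
        · rw [hyv, ← h5]; exact hP
        · rw [show x + -2 + x = x + (x + -2) from by ring]; exact hv


theorem pv_scan_iff (place : List String) (l seen : List (Int × Int)) :
    pvScan place l seen = true ↔
      ∃ pre p post, l = pre ++ p :: post ∧ pvCell place p.1 p.2 = 'P' ∧
        ∃ q ∈ seen ++ pre.filter (fun c => pvCell place c.1 c.2 = 'P'),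
          pvViol place p.1 p.2 q.1 q.2 = true := by
  induction l generalizing seen with
  | nil => simp [pvScan]
  | cons c rest ih =>
      obtain ⟨x, y⟩ := c
      rw [pvScan]
      by_cases hP : pvCell place x y = 'P'
      · rw [if_neg (not_not_intro hP)]
        by_cases hv : seen.any (fun q => pvViol place x y q.1 q.2) = true
        · rw [if_pos hv]
          obtain ⟨q, hq, hvq⟩ := List.any_eq_true.mp hv
          simp only [true_iff]
          exact ⟨[], (x, y), rest, rfl, hP, q, by simpa using hq, hvq⟩
        · rw [if_neg hv, ih]
          constructor
          · rintro ⟨pre, p, post, rfl, hpP, q, hq, hvq⟩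
            refine ⟨(x, y) :: pre, p, post, rfl, hpP, q, ?_, hvq⟩
            simp only [List.filter_cons, hP, decide_true, if_true, List.mem_append,
              List.mem_cons, List.append_assoc, List.cons_append, List.nil_append,
              List.mem_singleton] at hq ⊢
            tauto
          · rintro ⟨pre, p, post, heq, hpP, q, hq, hvq⟩
            cases pre with
            | nil =>
                rw [List.nil_append] at heq
                injection heq with h1 h2
                subst h2
                rw [← h1] at hpP hvq
                simp only [List.filter_nil, List.append_nil] at hq
                exact absurd (List.any_eq_true.mpr ⟨q, hq, hvq⟩) hv
            | cons c' pre' =>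
                rw [List.cons_append] at heq
                injection heq with h1 h2
                subst h2
                refine ⟨pre', p, post, rfl, hpP, q, ?_, hvq⟩
                rw [← h1] at hq
                simp only [List.filter_cons, hP, decide_true, if_true, List.mem_append,
                  List.mem_cons, List.append_assoc, List.cons_append, List.nil_append,
                  List.mem_singleton] at hq ⊢
                tauto
      · rw [if_pos hP, ih]
        constructor
        · rintro ⟨pre, p, post, rfl, hpP, q, hq, hvq⟩
          refine ⟨(x, y) :: pre, p, post, rfl, hpP, q, ?_, hvq⟩
          simpa [List.filter_cons, hP] using hq
        · rintro ⟨pre, p, post, heq, hpP, q, hq, hvq⟩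
          cases pre with
          | nil =>
              rw [List.nil_append] at heq
              injection heq with h1 h2
              rw [← h1] at hpP
              exact absurd hpP hP
          | cons c' pre' =>
              rw [List.cons_append] at heq
              injection heq with h1 h2
              subst h2
              refine ⟨pre', p, post, rfl, hpP, q, ?_, hvq⟩
              rw [← h1] at hq
              simpa [List.filter_cons, hP] using hq

theorem pv_mem_colOrder {p : Int × Int} :
    p ∈ pvColOrder ↔ 0 ≤ p.1 ∧ p.1 < 5 ∧ 0 ≤ p.2 ∧ p.2 < 5 := by
  obtain ⟨a, b⟩ := p
  simp only [pvColOrder, List.mem_flatMap, List.mem_map, PySem.List.mem_pyRange_one,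
    Prod.mk.injEq]
  constructor
  · rintro ⟨y, ⟨hy0, hy5⟩, x, ⟨hx0, hx5⟩, rfl, rfl⟩
    exact ⟨hx0, hx5, hy0, hy5⟩
  · rintro ⟨h1, h2, h3, h4⟩
    exact ⟨b, ⟨h3, h4⟩, a, ⟨h1, h2⟩, rfl, rfl⟩

theorem pv_nodup_colOrder : pvColOrder.Nodup := by decide

theorem pv_pair_split {l : List (Int × Int)} {p q : Int × Int}
    (hp : p ∈ l) (hq : q ∈ l) (hne : p ≠ q) :
    (∃ pre post, l = pre ++ p :: post ∧ q ∈ pre) ∨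
    (∃ pre post, l = pre ++ q :: post ∧ p ∈ pre) := by
  obtain ⟨s, t, rfl⟩ := List.append_of_mem hp
  rcases List.mem_append.mp hq with hqs | hqt
  · exact Or.inl ⟨s, t, rfl, hqs⟩
  · rcases List.mem_cons.mp hqt with rfl | hqt'
    · exact absurd rfl hne
    · obtain ⟨u, v, rfl⟩ := List.append_of_mem hqt'
      exact Or.inr ⟨s ++ p :: u, v, by simp, by simp⟩

theorem pv_main (place : List String) :
    ((PySem.List.pyRange 0 5 1).any (fun x =>
       (PySem.List.pyRange 0 5 1).any (fun y =>
         pvCell place x y == 'P' && !(check_person place x y)))) =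
    pvScan place pvColOrder [] := by
  rw [Bool.eq_iff_iff, pv_scan_iff]
  simp only [List.any_eq_true, PySem.List.mem_pyRange_one, Bool.and_eq_true, beq_iff_eq,
    Bool.not_eq_true', check_person, Bool.not_eq_false']
  constructor
  · rintro ⟨x, hx, y, hy, hcell, hcp⟩
    obtain ⟨i, hi, hc⟩ := hcp
    obtain ⟨u, v, hgu, hne, hv⟩ :=
      pv_fwd place x y i (PySem.List.mem_pyRange_one.mpr hi) hc
    have hpmem : ((x, y) : Int × Int) ∈ pvColOrder :=
      pv_mem_colOrder.mpr ⟨hx.1, hx.2, hy.1, hy.2⟩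
    have hqmem : ((u, v) : Int × Int) ∈ pvColOrder :=
      pv_mem_colOrder.mpr ⟨hgu.1, hgu.2.1, hgu.2.2.1, hgu.2.2.2.1⟩
    rcases pv_pair_split hpmem hqmem hne with ⟨pre, post, heq, hqpre⟩ | ⟨pre, post, heq, hqpre⟩
    · exact ⟨pre, (x, y), post, heq, hcell, (u, v),
        by rw [List.nil_append]; exact List.mem_filter.mpr ⟨hqpre, by simp [hgu.2.2.2.2]⟩, hv⟩
    · exact ⟨pre, (u, v), post, heq, hgu.2.2.2.2, (x, y),
        by rw [List.nil_append]; exact List.mem_filter.mpr ⟨hqpre, by simp [hcell]⟩,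
        by rw [pv_viol_symm]; exact hv⟩
  · rintro ⟨pre, p, post, heq, hpP, q, hq, hvq⟩
    simp only [List.nil_append] at hq
    have hqpre : q ∈ pre := List.mem_of_mem_filter hq
    have hqP : pvCell place q.1 q.2 = 'P' := by
      have := List.of_mem_filter hq; simpa using this
    have hpmem : p ∈ pvColOrder := by rw [heq]; simp
    have hqmem : q ∈ pvColOrder := by rw [heq]; exact List.mem_append.mpr (Or.inl hqpre)
    have hpr := pv_mem_colOrder.mp hpmem
    have hqr := pv_mem_colOrder.mp hqmem
    have hne : p ≠ q := by
      have hnd := pv_nodup_colOrder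
      rw [heq, List.nodup_middle] at hnd
      intro h
      exact (List.nodup_cons.mp hnd).1 (List.mem_append.mpr (Or.inl (h ▸ hqpre)))
    obtain ⟨i, hi, hc⟩ :=
      pv_bwd place p.1 p.2 q.1 q.2 ⟨hqr.1, hqr.2.1, hqr.2.2.1, hqr.2.2.2, hqP⟩
        (by simpa [Prod.ext_iff] using hne) hvq
    exact ⟨p.1, ⟨hpr.1, hpr.2.1⟩, p.2, ⟨hpr.2.2.1, hpr.2.2.2⟩, hpP,
      ⟨i, PySem.List.mem_pyRange_one.mp hi, hc⟩⟩

-- ===== VERDICT (by name: the statement is the Claim_ definition above) =====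
theorem check_keep_dist_spec : Claim_equal_check_keep_dist := by
  intro place _dom _pre
  unfold Spec_check_keep_dist check_keep_dist check_keep_dist_alt
  rw [pv_main]
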